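-- pv_equiv track=rewrite | github.com/miliar/Code_Jam_Webscraper | solutions_python/Problem_126/595.py | find_consecutive_consonants
-- ===== SOURCE A (Python) =====
-- import itertools
--
-- def find_consecutive_consonants(substrings, n):
--     vowels = ['a', 'e', 'i', 'o', 'u']
--     counter = 0
--     for string in substrings:
--         strings = [string]
--         for vowel in vowels:
--             strings = [sub.split(vowel) for sub in strings]
--             strings = list(itertools.chain(*strings))
--         has_sub = False
--         for sub in strings:
--             if len(sub) >= n:
--                 has_sub = True
--                 break
--         if has_sub: counter += 1
--
--     return counter
-- ===== SOURCE B (Python) =====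
-- def find_consecutive_consonants(substrings, n):
--     count = 0
--     for s in substrings:
--         cur = 0
--         best = 0
--         for ch in s:
--             if ch in 'aeiou':
--                 cur = 0
--             else:
--                 cur += 1
--                 if cur > best:
--                     best = cur
--         if best >= n:
--             count += 1
--     return count
-- ===== Notes on version B (the rewrite author's own statement) =====
-- stated objective: faster
-- what changed: Replaces the repeated split-by-each-vowel list building plus a scan over fragments with a single left-to-right pass per string that tracks the current and maximum consonant-run length and compares the maximum with n.
import Mathlib
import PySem

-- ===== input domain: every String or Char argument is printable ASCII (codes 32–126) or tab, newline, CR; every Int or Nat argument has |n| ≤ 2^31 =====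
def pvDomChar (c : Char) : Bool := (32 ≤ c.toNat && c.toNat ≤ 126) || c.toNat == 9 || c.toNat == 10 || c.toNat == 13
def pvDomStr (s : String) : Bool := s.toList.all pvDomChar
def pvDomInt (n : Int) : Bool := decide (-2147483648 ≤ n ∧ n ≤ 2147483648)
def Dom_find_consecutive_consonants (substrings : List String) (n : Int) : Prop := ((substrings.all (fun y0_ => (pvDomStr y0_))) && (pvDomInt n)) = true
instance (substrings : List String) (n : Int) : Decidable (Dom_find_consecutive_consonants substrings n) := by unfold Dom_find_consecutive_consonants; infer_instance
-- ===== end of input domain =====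

-- B replaces A's five successive vowel-splits and fragment scan by one pass per
-- string tracking the maximal consonant-run length (objective: faster, constant factor).


-- ===== PORT A =====
-- 'for sub in strings: if len(sub) >= n: has_sub = True; break'
def pvHasSubA (strings : List (List Char)) (n : Int) : Bool :=
  match strings with
  | [] => false
  | sub :: rest => if (sub.length : Int) ≥ n then true else pvHasSubA rest n

def find_consecutive_consonants (substrings : List String) (n : Int) : Int :=
  let vowels : List String := ["a", "e", "i", "o", "u"]
  substrings.foldl (fun counter string =>
    let strings : List (List Char) := [string.toList]
    let strings := vowels.foldl (fun strings vowel =>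
      -- strings = [sub.split(vowel) for sub in strings]; strings = list(chain(*strings))
      (strings.map (fun sub => PySem.Chars.splitOn sub vowel.toList)).flatten) strings
    let has_sub := pvHasSubA strings n
    if has_sub then counter + 1 else counter) 0

-- ===== PORT B =====
def pvIsVowel (c : Char) : Bool := c == 'a' || c == 'e' || c == 'i' || c == 'o' || c == 'u'

def find_consecutive_consonants_alt (substrings : List String) (n : Int) : Int :=
  substrings.foldl (fun count s =>
    let p := s.toList.foldl (fun (st : Int × Int) ch =>
      if pvIsVowel ch then (0, st.2)
      else (st.1 + 1, if st.1 + 1 > st.2 then st.1 + 1 else st.2)) (0, 0)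
    if p.2 ≥ n then count + 1 else count) 0

-- ===== PRECONDITION & SPEC =====
def Spec_find_consecutive_consonants (substrings : List String) (n : Int) (out : Int) : Prop := out = find_consecutive_consonants_alt substrings n
instance (substrings : List String) (n : Int) (out : Int) : Decidable (Spec_find_consecutive_consonants substrings n out) := by unfold Spec_find_consecutive_consonants; infer_instance

-- ===== CLAIM (what is proved, stated in full; the proofs are below) =====
def Claim_equal_find_consecutive_consonants : Prop := ∀ (substrings : List String) (n : Int), Dom_find_consecutive_consonants substrings n → Spec_find_consecutive_consonants substrings n (find_consecutive_consonants substrings n)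

-- ===== LEMMAS AND PROOFS =====

-- fragments of a char list split at every char satisfying p: (first fragment, later fragments)
def pvFrags (p : Char → Bool) : List Char → List Char × List (List Char)
  | [] => ([], [])
  | c :: xs =>
    let r := pvFrags p xs
    if p c then ([], r.1 :: r.2) else (c :: r.1, r.2)

-- the full fragment list
def pvF (p : Char → Bool) (s : List Char) : List (List Char) := (pvFrags p s).1 :: (pvFrags p s).2

theorem splitOn_go_frags (c : Char) (fuel : Nat) :
    ∀ (l cur : List Char) (acc : List (List Char)), l.length < fuel →
      PySem.Chars.splitOn.go [c] fuel l cur acc =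
        acc.reverse ++ ((cur.reverse ++ (pvFrags (· == c) l).1) :: (pvFrags (· == c) l).2) := by
  induction fuel with
  | zero => intro l cur acc h; omega
  | succ fuel ih =>
    intro l cur acc h
    cases l with
    | nil => simp [PySem.Chars.splitOn.go, pvFrags]
    | cons x rest =>
      rw [PySem.Chars.splitOn.go]
      by_cases hx : x = c
      · have hpre : List.isPrefixOf [c] (x :: rest) = true := by
          simp [List.isPrefixOf, hx]
        rw [if_pos hpre]
        have hdrop : List.drop ([c].length) (x :: rest) = rest := by simp
        rw [hdrop, ih rest [] (cur.reverse :: acc) (by simp at h; omega)]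
        simp [pvFrags, hx]
      · have hpre : List.isPrefixOf [c] (x :: rest) = false := by
          simp only [List.isPrefixOf, Bool.and_true,
            beq_eq_false_iff_ne]
          exact fun h' => hx h'.symm
        rw [if_neg (by simp [hpre])]
        rw [ih rest (x :: cur) acc (by simp at h; omega)]
        have hpc : ((x == c) : Bool) = false := by simp [hx]
        simp [pvFrags, hpc]

theorem splitOn_frags (c : Char) (s : List Char) :
    PySem.Chars.splitOn s [c] = pvF (· == c) s := by
  unfold PySem.Chars.splitOn pvF
  rw [splitOn_go_frags c (s.length + 1) s [] [] (by omega)]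
  simp

theorem flatMap_frags (p q : Char → Bool) (s : List Char) :
    (pvF p s).flatMap (pvF q) = pvF (fun c => p c || q c) s := by
  induction s with
  | nil => simp [pvF, pvFrags]
  | cons c s ih =>
    by_cases hp : p c
    · have e1 : pvF p (c :: s) = [] :: pvF p s := by simp [pvF, pvFrags, hp]
      have e3 : pvF (fun c => p c || q c) (c :: s) = [] :: pvF (fun c => p c || q c) s := by
        simp [pvF, pvFrags, hp]
      rw [e1, List.flatMap_cons, e3, ← ih]
      simp [pvF, pvFrags]
    · have hfh : pvF p (c :: s) = (c :: (pvFrags p s).1) :: (pvFrags p s).2 := by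
        simp [pvF, pvFrags, hp]
      have ihx : pvF q (pvFrags p s).1 ++ (pvFrags p s).2.flatMap (pvF q)
          = pvF (fun c => p c || q c) s := by
        rw [← ih, show pvF p s = (pvFrags p s).1 :: (pvFrags p s).2 from rfl,
          List.flatMap_cons]
      by_cases hq : q c
      · have e2 : pvF q (c :: (pvFrags p s).1) = [] :: pvF q (pvFrags p s).1 := by
          simp [pvF, pvFrags, hq]
        have e3 : pvF (fun c => p c || q c) (c :: s) = [] :: pvF (fun c => p c || q c) s := by
          simp [pvF, pvFrags, hp, hq]
        rw [hfh, List.flatMap_cons, e2, e3, ← ihx]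
        simp
      · have e2 : pvF q (c :: (pvFrags p s).1)
            = (c :: (pvFrags q (pvFrags p s).1).1) :: (pvFrags q (pvFrags p s).1).2 := by
          simp [pvF, pvFrags, hq]
        have hih' : (pvFrags q (pvFrags p s).1).1
              :: ((pvFrags q (pvFrags p s).1).2 ++ (pvFrags p s).2.flatMap (pvF q))
            = pvF (fun c => p c || q c) s := by
          rw [← ihx, show pvF q (pvFrags p s).1
              = (pvFrags q (pvFrags p s).1).1 :: (pvFrags q (pvFrags p s).1).2 from rfl]
          simp
        unfold pvF at hih'
        injection hih' with h1 h2
        have e3 : pvF (fun c => p c || q c) (c :: s)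
            = (c :: (pvFrags (fun c => p c || q c) s).1) :: (pvFrags (fun c => p c || q c) s).2 := by
          simp [pvF, pvFrags, hp, hq]
        rw [hfh, List.flatMap_cons, e2, e3, ← h1, ← h2]
        rfl

theorem foldr_max_nonneg (l : List Int) : 0 ≤ l.foldr max 0 := by
  induction l with
  | nil => simp
  | cons x t ih => exact le_trans ih (by simp [List.foldr_cons])

theorem foldlB_frags (s : List Char) : ∀ cur best : Int, 0 ≤ cur → cur ≤ best →
    (s.foldl (fun (st : Int × Int) ch =>
      if pvIsVowel ch then (0, st.2)
      else (st.1 + 1, if st.1 + 1 > st.2 then st.1 + 1 else st.2)) (cur, best)).2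
    = max best (max (cur + ((pvFrags pvIsVowel s).1.length : Int))
        (((pvFrags pvIsVowel s).2.map (fun f => (f.length : Int))).foldr max 0)) := by
  induction s with
  | nil => intro cur best h0 hcb; simp [pvFrags]; omega
  | cons c s ih =>
    intro cur best h0 hcb
    simp only [List.foldl_cons]
    by_cases hv : pvIsVowel c
    · rw [if_pos hv, ih 0 best le_rfl (le_trans h0 hcb)]
      simp [pvFrags, hv]
      omega
    · rw [if_neg hv]
      rw [ih (cur + 1) (if cur + 1 > best then cur + 1 else best) (by omega) (by split <;> omega)]
      have hv' : pvIsVowel c = false := by simpa using hv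
      simp [pvFrags, hv']
      split_ifs <;> omega

theorem hasSubA_max (n : Int) : ∀ (t : List (List Char)) (x : List Char),
    pvHasSubA (x :: t) n = decide (n ≤ ((x :: t).map (fun f => (f.length : Int))).foldr max 0) := by
  intro t
  induction t with
  | nil =>
    intro x
    have hm : max ((x.length : Int)) 0 = (x.length : Int) := by omega
    simp only [pvHasSubA, List.map_cons, List.map_nil, List.foldr_cons, List.foldr_nil, hm]
    by_cases h : (x.length : Int) ≥ n <;> simp [h]
  | cons y t ih =>
    intro x
    simp only [pvHasSubA, List.map_cons, List.foldr_cons] at *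
    by_cases h : (x.length : Int) ≥ n
    · have : n ≤ max ((x.length : Int)) (((y :: t).map (fun f => (f.length : Int))).foldr max 0) := by
        simp only [List.map_cons, List.foldr_cons] at *
        omega
      simp only [List.map_cons, List.foldr_cons] at this
      simp [h, this]
    · rw [if_neg h, ih y]
      have hiff : (n ≤ max ((x.length : Int)) (max ((y.length : Int)) ((t.map (fun f => (f.length : Int))).foldr max 0)))
          ↔ (n ≤ max ((y.length : Int)) ((t.map (fun f => (f.length : Int))).foldr max 0)) := by omega
      simp [hiff]

theorem per_string (s : List Char) (n : Int) :
    pvHasSubA (pvF pvIsVowel s) n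
    = decide (n ≤ (s.foldl (fun (st : Int × Int) ch =>
        if pvIsVowel ch then (0, st.2)
        else (st.1 + 1, if st.1 + 1 > st.2 then st.1 + 1 else st.2)) (0, 0)).2) := by
  rw [show pvF pvIsVowel s = (pvFrags pvIsVowel s).1 :: (pvFrags pvIsVowel s).2 from rfl,
    hasSubA_max, foldlB_frags s 0 0 le_rfl le_rfl]
  have h2 := foldr_max_nonneg (((pvFrags pvIsVowel s).2.map (fun f => (f.length : Int))))
  have hx : (0 : Int) ≤ ((pvFrags pvIsVowel s).1.length : Int) := by positivity
  simp only [List.map_cons, List.foldr_cons]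
  rw [show max (0 : Int) (max (0 + ((pvFrags pvIsVowel s).1.length : Int))
      (((pvFrags pvIsVowel s).2.map (fun f => (f.length : Int))).foldr max 0))
    = max ((pvFrags pvIsVowel s).1.length : Int)
      (((pvFrags pvIsVowel s).2.map (fun f => (f.length : Int))).foldr max 0) from by omega]
  rfl

theorem find_consecutive_consonants_spec : Claim_equal_find_consecutive_consonants := by
  intro substrings n _
  unfold Spec_find_consecutive_consonants find_consecutive_consonants find_consecutive_consonants_alt
  simp only []
  congr 1
  funext counter s
  simp only [List.foldl_cons, List.foldl_nil,
    show ("a" : String).toList = ['a'] from rfl, show ("e" : String).toList = ['e'] from rfl,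
    show ("i" : String).toList = ['i'] from rfl, show ("o" : String).toList = ['o'] from rfl,
    show ("u" : String).toList = ['u'] from rfl,
    splitOn_frags, ← List.flatMap_def, List.flatMap_cons, List.flatMap_nil,
    List.append_nil, flatMap_frags]
  change (if pvHasSubA (pvF pvIsVowel s.toList) n = true then counter + 1 else counter) = _
  rw [per_string]
  simp only [decide_eq_true_eq, ge_iff_le]
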